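-- pv_equiv track=rewrite | github.com/GiIZbestgroup/grafy1 | lab03/Graph.py | get_minimax
-- ===== SOURCE A (Python) =====
-- def get_minimax(distance_matrix):
--     min_max_distance = max(distance_matrix[0])
--     minimax = 0
--
--     it = 0
--     #Szukamy minimalnej najwiekszej odleglosci po wierszach macierzy
--     for node in distance_matrix:
--         if max(node) < min_max_distance:
--             min_max_distance = max(node)
--             minimax = it
--         it += 1
--
--     # Zwracamy krotke (centrum_minimax, najdluzszy_dystans)
--     return minimax, min_max_distance
-- ===== SOURCE B (Python) =====
-- def get_minimax(distance_matrix):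
--     # Two-phase: build the per-row maxima table, then scan it for the first minimum.
--     row_maxes = [max(row) for row in distance_matrix]
--     m = min(row_maxes)
--     return row_maxes.index(m), m
-- ===== Notes on version B (the rewrite author's own statement) =====
-- stated objective: simpler
-- what changed: Replaced the fused running-argmin loop with two phases: a per-row maxima table built once, then min + first-index lookup on that table.
-- outside the precondition, e.g. on get_minimax([]): A raises IndexError, B raises ValueError; on get_minimax([[]]): A raises ValueError, B raises ValueError
import Mathlib
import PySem

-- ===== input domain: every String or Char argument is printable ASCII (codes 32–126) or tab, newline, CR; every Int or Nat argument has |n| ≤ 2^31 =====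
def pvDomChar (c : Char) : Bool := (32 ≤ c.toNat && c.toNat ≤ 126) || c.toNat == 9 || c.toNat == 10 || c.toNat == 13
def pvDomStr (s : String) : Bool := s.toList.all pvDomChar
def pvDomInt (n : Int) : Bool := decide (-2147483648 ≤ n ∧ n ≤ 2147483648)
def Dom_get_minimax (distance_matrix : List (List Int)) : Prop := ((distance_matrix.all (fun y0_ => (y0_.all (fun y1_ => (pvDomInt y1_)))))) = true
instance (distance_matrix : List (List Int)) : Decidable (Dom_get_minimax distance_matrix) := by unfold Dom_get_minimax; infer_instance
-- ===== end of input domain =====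

-- B is the same minimax search decomposed into two phases (per-row maxima table, then min + first index);
-- proved equal to A on nonempty matrices with nonempty rows (elsewhere both Pythons raise).

-- shared helper: Python's max(row) (rows are nonempty under Pre_, so the default is never used)
def pyMaxRow (row : List Int) : Int := (PySem.List.max? row (fun y => y)).getD 0

-- ===== PORT A =====
def get_minimax (distance_matrix : List (List Int)) : Int × Int :=
  let min_max_distance := pyMaxRow (distance_matrix.headD [])
  let s := distance_matrix.foldl
    (fun (st : Int × Int × Int) node =>
      if pyMaxRow node < st.2.1 then (st.2.2, pyMaxRow node, st.2.2 + 1)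
      else (st.1, st.2.1, st.2.2 + 1))
    (0, min_max_distance, 0)
  (s.1, s.2.1)

-- ===== PORT B =====
def get_minimax_alt (distance_matrix : List (List Int)) : Int × Int :=
  let row_maxes := distance_matrix.map pyMaxRow
  let m := (PySem.List.min? row_maxes (fun y => y)).getD 0
  (((PySem.List.index? row_maxes m).getD 0 : Nat), m)

-- ===== PRECONDITION & SPEC =====
-- A raises IndexError on an empty matrix and ValueError on an empty row; Pre_ excludes exactly those.
def Pre_get_minimax (distance_matrix : List (List Int)) : Prop :=
  distance_matrix ≠ [] ∧ ∀ row ∈ distance_matrix, row ≠ []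
instance (distance_matrix : List (List Int)) : Decidable (Pre_get_minimax distance_matrix) := by
  unfold Pre_get_minimax; infer_instance

def pvWitness_get_minimax : List (List Int) := [[1, 5], [3, 2], [4]]

def Spec_get_minimax (distance_matrix : List (List Int)) (out : Int × Int) : Prop := out = get_minimax_alt distance_matrix
instance (distance_matrix : List (List Int)) (out : Int × Int) : Decidable (Spec_get_minimax distance_matrix out) := by unfold Spec_get_minimax; infer_instance

-- ===== CLAIM (what is proved, stated in full; the proofs are below) =====
def Claim_equal_get_minimax : Prop := ∀ (distance_matrix : List (List Int)), Dom_get_minimax distance_matrix → Pre_get_minimax distance_matrix → Spec_get_minimax distance_matrix (get_minimax distance_matrix)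

-- ===== LEMMAS AND PROOFS =====

lemma foldl_min_le_init (l : List Int) (a : Int) : l.foldl min a ≤ a := by
  induction l generalizing a with
  | nil => simp
  | cons x xs ih => exact le_trans (ih (min a x)) (min_le_left a x)

lemma foldl_min_mem (l : List Int) (a : Int) : l.foldl min a ∈ a :: l := by
  induction l generalizing a with
  | nil => simp
  | cons x xs ih =>
    simp only [List.foldl_cons]
    rcases List.mem_cons.mp (ih (min a x)) with h | h
    · rw [h]
      rcases le_total a x with hax | hxa
      · simp [min_eq_left hax]
      · simp [min_eq_right hxa]
    · simp [h]

-- A's fold characterised: value = running min, index = offset + first index of that min (or mm if no improvement)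
lemma foldA_spec (l : List Int) (mm md it : Int) :
    l.foldl (fun (st : Int × Int × Int) x =>
        if x < st.2.1 then (st.2.2, x, st.2.2 + 1)
        else (st.1, st.2.1, st.2.2 + 1)) (mm, md, it)
    = ((if l.foldl min md < md then it + (l.idxOf (l.foldl min md) : Int) else mm),
       l.foldl min md, it + (l.length : Int)) := by
  induction l generalizing mm md it with
  | nil => simp
  | cons x xs ih =>
    simp only [List.foldl_cons]
    by_cases hx : x < md
    · rw [if_pos hx, ih, min_eq_right hx.le]
      by_cases hm : xs.foldl min x < x
      · rw [if_pos hm, if_pos (lt_trans hm hx)]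
        have hb : (x == xs.foldl min x) = false := by
          simp [Ne.symm (ne_of_lt hm)]
        simp only [List.idxOf_cons, hb, cond_false, Prod.mk.injEq, List.length_cons]
        refine ⟨by push_cast; ring, trivial, by push_cast; ring⟩
      · have heq : xs.foldl min x = x := le_antisymm (foldl_min_le_init xs x) (not_lt.mp hm)
        rw [if_neg hm, heq, if_pos hx]
        simp only [List.idxOf_cons_self, Prod.mk.injEq, List.length_cons]
        refine ⟨by push_cast; ring, trivial, by push_cast; ring⟩
    · rw [if_neg hx, ih]
      rw [min_eq_left (not_lt.mp hx)]
      by_cases hm : xs.foldl min md < md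
      · rw [if_pos hm, if_pos hm]
        have hb : (x == xs.foldl min md) = false := by
          simp [Ne.symm (ne_of_lt (lt_of_lt_of_le hm (not_lt.mp hx)))]
        simp only [List.idxOf_cons, hb, cond_false, Prod.mk.injEq, List.length_cons]
        refine ⟨by push_cast; ring, trivial, by push_cast; ring⟩
      · rw [if_neg hm, if_neg hm]
        simp only [Prod.mk.injEq, List.length_cons]
        refine ⟨trivial, trivial, by push_cast; ring⟩

lemma idxOf?_eq_some_idxOf {l : List Int} {v : Int} (h : v ∈ l) :
    l.idxOf? v = some (l.idxOf v) := by
  induction l with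
  | nil => simp at h
  | cons x xs ih =>
    by_cases hx : x = v
    · simp [List.idxOf?_cons, hx]
    · have hv : v ∈ xs := by
        rcases List.mem_cons.mp h with h' | h'
        · exact absurd h'.symm hx
        · exact h'
      simp [List.idxOf?_cons, hx, ih hv]

-- ===== VERDICT (by name: the statement is the Claim_ definition above) =====
theorem get_minimax_spec : Claim_equal_get_minimax := by
  intro dm _ hpre
  obtain ⟨hne, _⟩ := hpre
  unfold Spec_get_minimax get_minimax get_minimax_alt
  obtain ⟨h, t, rfl⟩ : ∃ h t, dm = h :: t := by
    cases dm with
    | nil => exact absurd rfl hne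
    | cons h t => exact ⟨h, t, rfl⟩
  simp only [List.headD_cons, List.map_cons]
  rw [show ((h :: t).foldl
      (fun (st : Int × Int × Int) node =>
        if pyMaxRow node < st.2.1 then (st.2.2, pyMaxRow node, st.2.2 + 1)
        else (st.1, st.2.1, st.2.2 + 1)) (0, pyMaxRow h, 0))
    = ((pyMaxRow h :: t.map pyMaxRow).foldl
      (fun (st : Int × Int × Int) x =>
        if x < st.2.1 then (st.2.2, x, st.2.2 + 1)
        else (st.1, st.2.1, st.2.2 + 1)) (0, pyMaxRow h, 0)) from by
      rw [← List.map_cons, List.foldl_map]]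
  rw [foldA_spec]
  rw [PySem.List.min?_id_cons]
  simp only [List.foldl_cons, min_self, Option.getD_some]
  have hmem : (t.map pyMaxRow).foldl min (pyMaxRow h) ∈ pyMaxRow h :: t.map pyMaxRow :=
    foldl_min_mem _ _
  rw [PySem.List.index?_eq_idxOf?, idxOf?_eq_some_idxOf hmem, Option.getD_some]
  by_cases hlt : (t.map pyMaxRow).foldl min (pyMaxRow h) < pyMaxRow h
  · rw [if_pos hlt]; simp
  · have heq : (t.map pyMaxRow).foldl min (pyMaxRow h) = pyMaxRow h :=
      le_antisymm (foldl_min_le_init _ _) (not_lt.mp hlt)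
    rw [if_neg hlt, heq]
    simp [List.idxOf_cons_self]
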